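-- pv_equiv track=rewrite | github.com/jclapis/qsfe | Forest/ForestOracles/Simon/matrix_math.py | solve_matrix
-- ===== SOURCE A (Python) =====
-- def solve_matrix(matrix, right_hand_side):
--     """
--     Performs back substitution on an N x N boolean matrix in RREF form to determine the
--     solution to each equation represented by its rows (noting that the equations are
--     of the form [X · S] % 2 = 0). For Simon's Algorithm, this gives you the secret
--     string S that's hidden in the original function being evaluated.
--
--     Parameters:
--         matrix (list[list[bool]]): The matrix representing the equations to solve. It must be
--             N x N and already in RREF form.
--         right_hand_side (list[bool]): A vector representing the right-hand-side of the
--             equations held in the matrix. These are the "solutions" to each equation.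
--
--     Returns:
--         The solution to the matrix, in this case the secret string S.
--
--     Remarks:
--         For a good, visual example of how this process works, take a look at this math
--         StackExchange post:
--         https://math.stackexchange.com/a/45348
--     """
--
--     secret_string = [False] * len(matrix)
--
--     # Start at the bottom row and work our way up to the top
--     for row_index in range(len(matrix) - 1, -1, -1):
--         row = matrix[row_index]
--         right_hand_side_value = right_hand_side[row_index]  # Solution for this equation
--
--         # Walk through the values of the row (these correspond to the variables for each
--         # row beneath it, which have already been solved at this point since we're going
--         # bottom up); if this row has a 1 for that variable, XOR the solution value with
--         # whatever that row's value ended up being.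
--         for column_index in range(row_index + 1, len(row)):
--             if row[column_index]:
--                 right_hand_side_value ^= secret_string[column_index]
--
--         # Once the terms have been calculated, assign the solution value at this row's
--         # index to the result of the equation.
--         secret_string[row_index] = right_hand_side_value
--
--     return secret_string
-- ===== SOURCE B (Python) =====
-- def solve_matrix(matrix, right_hand_side):
--     """Back substitution by forward scattering: once a variable is solved, its
--     value is immediately XOR-ed into the right-hand side of every row above
--     that mentions it, instead of re-summing each row's tail when it is reached."""
--     n = len(matrix)
--     working = list(right_hand_side)
--     secret = [False] * n
--     for i in range(n - 1, -1, -1):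
--         secret[i] = working[i]
--         for k in range(i):
--             row = matrix[k]
--             if i < len(row) and row[i]:
--                 working[k] ^= secret[i]
--     return secret
-- ===== Notes on version B (the rewrite author's own statement) =====
-- stated objective: alternative
-- what changed: Replaces per-row gathering (each row re-sums the already-solved entries of its own tail) by forward scattering: each newly solved variable is immediately XOR-ed into the working right-hand side of every earlier row whose column is set.
import Mathlib
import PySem

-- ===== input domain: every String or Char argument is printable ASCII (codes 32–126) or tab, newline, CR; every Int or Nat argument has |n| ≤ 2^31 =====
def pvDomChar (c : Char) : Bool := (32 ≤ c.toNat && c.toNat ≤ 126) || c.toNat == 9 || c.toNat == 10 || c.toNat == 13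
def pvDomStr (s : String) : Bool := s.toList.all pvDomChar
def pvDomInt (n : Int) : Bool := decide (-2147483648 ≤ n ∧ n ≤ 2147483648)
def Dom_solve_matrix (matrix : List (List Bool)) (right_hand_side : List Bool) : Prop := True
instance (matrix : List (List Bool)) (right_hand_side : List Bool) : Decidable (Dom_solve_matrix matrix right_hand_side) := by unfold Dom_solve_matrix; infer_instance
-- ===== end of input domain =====

-- B solves by forward scattering (each solved variable is XOR-ed into the rows above at once)
-- instead of A's per-row gathering; same O(n^2) cost, different traversal (objective: alternative).

-- ===== PORT A =====
-- the outer 'for row_index in range(len(matrix)-1, -1, -1)' as structural recursion on the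
-- remaining row count (counter i+1 processes row i); indices are in range under Pre_, so
-- Python's list indexing is rendered with getD.
def pvA_loop (matrix : List (List Bool)) (right_hand_side : List Bool) :
    Nat → List Bool → List Bool
  | 0, secret => secret
  | i + 1, secret =>
      let row := matrix.getD i []
      let rhs0 := right_hand_side.getD i false
      -- for column_index in range(row_index+1, len(row)): if row[column_index]: value ^= secret[column_index]
      let value := (List.range' (i + 1) (row.length - (i + 1))).foldl
        (fun acc j => if row.getD j false then acc ^^ secret.getD j false else acc) rhs0
      pvA_loop matrix right_hand_side i (secret.set i value)

def solve_matrix (matrix : List (List Bool)) (right_hand_side : List Bool) : List Bool :=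
  pvA_loop matrix right_hand_side matrix.length (List.replicate matrix.length false)

-- ===== PORT B =====
-- Source B's outer loop as recursion on the remaining row count; the inner
-- 'for k in range(i)' is a foldl over List.range i updating the working right-hand side.
def pvB_loop (matrix : List (List Bool)) : Nat → List Bool → List Bool → List Bool
  | 0, _, secret => secret
  | i + 1, working, secret =>
      let s := working.getD i false
      let secret' := secret.set i s
      let working' := (List.range i).foldl
        (fun w k =>
          let row := matrix.getD k []
          if i < row.length ∧ row.getD i false then w.set k ((w.getD k false) ^^ s) else w)
        working
      pvB_loop matrix i working' secret'

def solve_matrix_alt (matrix : List (List Bool)) (right_hand_side : List Bool) : List Bool :=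
  pvB_loop matrix matrix.length right_hand_side (List.replicate matrix.length false)

-- ===== PRECONDITION & SPEC =====
-- Exactly the inputs where the Python A returns: the right-hand side vector is at least as
-- long as the matrix, and no row has a true entry (right of the diagonal) in a column beyond
-- the number of rows — otherwise A raises IndexError.
def Pre_solve_matrix (matrix : List (List Bool)) (right_hand_side : List Bool) : Prop :=
  matrix.length ≤ right_hand_side.length ∧
  ∀ i, i < matrix.length → ∀ j, j < (matrix.getD i []).length → i < j →
    (matrix.getD i []).getD j false = true → j < matrix.length
instance (matrix : List (List Bool)) (right_hand_side : List Bool) : Decidable (Pre_solve_matrix matrix right_hand_side) := by unfold Pre_solve_matrix; infer_instance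
def pvWitness_solve_matrix : List (List Bool) × List Bool :=
  ([[true, true], [false, true]], [true, false])

def Spec_solve_matrix (matrix : List (List Bool)) (right_hand_side : List Bool) (out : List Bool) : Prop := out = solve_matrix_alt matrix right_hand_side
instance (matrix : List (List Bool)) (right_hand_side : List Bool) (out : List Bool) : Decidable (Spec_solve_matrix matrix right_hand_side out) := by unfold Spec_solve_matrix; infer_instance

-- ===== CLAIM (what is proved, stated in full; the proofs are below) =====
def Claim_equal_solve_matrix : Prop := ∀ (matrix : List (List Bool)) (right_hand_side : List Bool), Dom_solve_matrix matrix right_hand_side → Pre_solve_matrix matrix right_hand_side → Spec_solve_matrix matrix right_hand_side (solve_matrix matrix right_hand_side)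

-- ===== LEMMAS AND PROOFS =====

-- the XOR of secret entries over columns [m, m+c) whose row entry is set
def pvX (row secret : List Bool) : Nat → Nat → Bool
  | _, 0 => false
  | m, c + 1 =>
      (if row.getD m false then secret.getD m false else false) ^^ pvX row secret (m + 1) c

theorem pvA_fold_eq_X (row secret : List Bool) :
    ∀ c m init, (List.range' m c).foldl
      (fun acc j => if row.getD j false then acc ^^ secret.getD j false else acc) init
      = (init ^^ pvX row secret m c) := by
  intro c
  induction c with
  | zero => intro m init; simp [pvX]
  | succ c ih =>
      intro m init
      rw [List.range'_succ, List.foldl_cons, ih, pvX]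
      cases h : row.getD m false <;> simp [Bool.xor_assoc]

theorem pvX_zero (row secret : List Bool) :
    ∀ c m, (∀ j, m ≤ j → row.getD j false = false) → pvX row secret m c = false := by
  intro c
  induction c with
  | zero => intro m _; rfl
  | succ c ih =>
      intro m h
      rw [pvX, h m le_rfl, ih (m + 1) (fun j hj => h j (by omega))]
      rfl

theorem pvX_split (row secret : List Bool) :
    ∀ c d m, pvX row secret m (c + d) = (pvX row secret m c ^^ pvX row secret (m + c) d) := by
  intro c
  induction c with
  | zero => intro d m; simp [pvX]
  | succ c ih =>
      intro d m
      have : c + 1 + d = (c + d) + 1 := by omega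
      rw [this, pvX, pvX, ih, Bool.xor_assoc]
      have : m + (c + 1) = m + 1 + c := by omega
      rw [this]

theorem pvX_ext (row secret : List Bool) {c c' : Nat} (m : Nat) (hle : c ≤ c')
    (h : ∀ j, m + c ≤ j → row.getD j false = false) :
    pvX row secret m c' = pvX row secret m c := by
  have : c' = c + (c' - c) := by omega
  rw [this, pvX_split, pvX_zero row secret (c' - c) (m + c) (fun j hj => h j hj)]
  simp

theorem pvX_congr_secret (row s1 s2 : List Bool) :
    ∀ c m, (∀ j, m ≤ j → j < m + c → s1.getD j false = s2.getD j false) →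
    pvX row s1 m c = pvX row s2 m c := by
  intro c
  induction c with
  | zero => intro m _; rfl
  | succ c ih =>
      intro m h
      rw [pvX, pvX, h m le_rfl (by omega), ih (m + 1) (fun j h1 h2 => h j (by omega) (by omega))]

-- length is preserved by B's inner scatter fold
theorem pvB_fold_length (matrix : List (List Bool)) (i : Nat) :
    ∀ (l : List Nat) (w : List Bool),
      ((l.foldl (fun w k =>
          let row := matrix.getD k []
          if i < row.length ∧ row.getD i false then w.set k ((w.getD k false) ^^ s) else w) w)).length
        = w.length := by
  intro l
  induction l with
  | nil => intro w; rfl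
  | cons a l ih =>
      intro w
      simp only [List.foldl_cons]
      rw [ih]
      split <;> simp

-- effect of B's inner scatter fold on each entry
theorem pvB_fold_getD (matrix : List (List Bool)) (i : Nat) (s : Bool) :
    ∀ (n : Nat) (w : List Bool) (k : Nat), k < w.length →
      (((List.range n).foldl (fun w k =>
          let row := matrix.getD k []
          if i < row.length ∧ row.getD i false then w.set k ((w.getD k false) ^^ s) else w) w)).getD k false
        = if k < n ∧ i < (matrix.getD k []).length ∧ (matrix.getD k []).getD i false
          then ((w.getD k false) ^^ s) else w.getD k false := by
  intro n
  induction n with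
  | zero =>
      intro w k hk
      simp [List.range_zero]
  | succ n ih =>
      intro w k hk
      rw [List.range_succ, List.foldl_append, List.foldl_cons, List.foldl_nil]
      set W := (List.range n).foldl (fun w k =>
          let row := matrix.getD k []
          if i < row.length ∧ row.getD i false then w.set k ((w.getD k false) ^^ s) else w) w with hW
      have hWlen : W.length = w.length := pvB_fold_length matrix i (List.range n) w
      have step : ∀ hkn : k ≠ n,
          (if k < n ∧ i < (matrix.getD k []).length ∧ (matrix.getD k []).getD i false = true
            then ((w.getD k false) ^^ s) else w.getD k false)
          = (if k < n + 1 ∧ i < (matrix.getD k []).length ∧ (matrix.getD k []).getD i false = true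
            then ((w.getD k false) ^^ s) else w.getD k false) := by
        intro hkn
        by_cases hC : i < (matrix.getD k []).length ∧ (matrix.getD k []).getD i false = true
        · by_cases hlt : k < n
          · rw [if_pos ⟨hlt, hC⟩, if_pos ⟨by omega, hC⟩]
          · rw [if_neg (fun h => hlt h.1), if_neg (fun h => absurd h.1 (by omega))]
        · rw [if_neg (fun h => hC h.2), if_neg (fun h => hC h.2)]
      by_cases hc : i < (matrix.getD n []).length ∧ (matrix.getD n []).getD i false = true
      · rw [if_pos hc]
        by_cases hkn : k = n
        · subst hkn
          have hkW : k < W.length := by omega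
          have h1 : (W.set k ((W.getD k false) ^^ s)).getD k false = ((W.getD k false) ^^ s) := by
            simp [List.getD, List.getElem?_set, hkW]
          rw [h1, ih w k hk, if_neg (fun h => absurd h.1 (Nat.lt_irrefl k)),
            if_pos ⟨Nat.lt_succ_self k, hc⟩]
        · have hnk : n ≠ k := fun h => hkn h.symm
          have h1 : (W.set n ((W.getD n false) ^^ s)).getD k false = W.getD k false := by
            simp [List.getD, List.getElem?_set, hnk]
          rw [h1, ih w k hk, step hkn]
      · rw [if_neg hc, ih w k hk]
        by_cases hkn : k = n
        · subst hkn
          rw [if_neg (fun h => hc h.2), if_neg (fun h => hc h.2)]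
        · exact step hkn

-- A's row value and B's scattered value agree under Pre_
theorem pv_rowval (matrix : List (List Bool)) (rhs secret : List Bool)
    (hpre : Pre_solve_matrix matrix rhs) (i : Nat) (hi : i < matrix.length) :
    pvX (matrix.getD i []) secret (i + 1) ((matrix.getD i []).length - (i + 1))
      = pvX (matrix.getD i []) secret (i + 1) (matrix.length - (i + 1)) := by
  set row := matrix.getD i [] with hrow
  rcases le_total row.length matrix.length with hle | hle
  · exact (pvX_ext (c := row.length - (i + 1)) row secret (i + 1) (by omega)
      (fun j hj => List.getD_eq_default _ _ (by omega))).symm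
  · refine pvX_ext (c := matrix.length - (i + 1)) row secret (i + 1) (by omega)
      (fun j hj => ?_)
    by_cases hjl : j < row.length
    · cases h : row.getD j false
      · rfl
      · exact absurd (hpre.2 i hi j hjl (by omega) h) (by omega)
    · exact List.getD_eq_default _ _ (by omega)

-- main simultaneous induction: A's gathering loop and B's scattering loop produce
-- the same secret from any pair of states related by the working-vector invariant
theorem pv_main (matrix : List (List Bool)) (rhs : List Bool)
    (hpre : Pre_solve_matrix matrix rhs) :
    ∀ i, i ≤ matrix.length → ∀ (working secret : List Bool),
      working.length = rhs.length → secret.length = matrix.length →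
      (∀ k, k < i → working.getD k false
          = (rhs.getD k false ^^ pvX (matrix.getD k []) secret i (matrix.length - i))) →
      pvA_loop matrix rhs i secret = pvB_loop matrix i working secret := by
  intro i
  induction i with
  | zero => intro _ working secret _ _ _; rfl
  | succ i ih =>
      intro hi working secret hwlen hslen hinv
      have hilt : i < matrix.length := by omega
      have hrhs : matrix.length ≤ rhs.length := hpre.1
      have hs : working.getD i false
          = (rhs.getD i false ^^
              pvX (matrix.getD i []) secret (i + 1) ((matrix.getD i []).length - (i + 1))) := by
        rw [hinv i (Nat.lt_succ_self i), pv_rowval matrix rhs secret hpre i hilt]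
      rw [pvA_loop, pvB_loop]
      simp only [pvA_fold_eq_X, ← hs]
      set s := working.getD i false with hsdef
      set secret' := secret.set i s with hsec
      set working' := (List.range i).foldl (fun w k =>
          let row := matrix.getD k []
          if i < row.length ∧ row.getD i false then w.set k ((w.getD k false) ^^ s) else w)
          working with hwork
      have hslen' : secret'.length = matrix.length := by simp [hsec, hslen]
      have hwlen' : working'.length = rhs.length := by
        rw [hwork, pvB_fold_length]; exact hwlen
      have hsget : secret'.getD i false = s := by
        have hil : i < secret.length := by omega
        simp [hsec, List.getD, List.getElem?_set, hil]
      have hsame : ∀ j, j ≠ i → secret'.getD j false = secret.getD j false := by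
        intro j hj
        have hij : i ≠ j := fun h => hj h.symm
        simp [hsec, List.getD, List.getElem?_set, hij]
      apply ih (by omega) working' secret' hwlen' hslen'
      intro k hk
      have hkw : k < working.length := by omega
      rw [hwork, pvB_fold_getD matrix i s i working k hkw]
      have hcount : matrix.length - i = (matrix.length - (i + 1)) + 1 := by omega
      rw [hcount, pvX]
      have hXc : pvX (matrix.getD k []) secret' (i + 1) (matrix.length - (i + 1))
          = pvX (matrix.getD k []) secret (i + 1) (matrix.length - (i + 1)) := by
        exact pvX_congr_secret _ _ _ _ _ (fun j h1 _ => hsame j (by omega))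
      rw [hsget, hXc, hinv k (by omega)]
      by_cases hrk : (matrix.getD k []).getD i false = true
      · have hil : i < (matrix.getD k []).length := by
          by_contra h
          rw [List.getD_eq_default _ _ (by omega)] at hrk
          exact Bool.false_ne_true hrk
        rw [if_pos ⟨hk, hil, hrk⟩, if_pos hrk]
        simp [Bool.xor_assoc, Bool.xor_comm, Bool.xor_left_comm]
      · rw [if_neg (fun h => hrk h.2.2), if_neg hrk]
        simp

-- ===== VERDICT (by name: the statement is the Claim_ definition above) =====
theorem solve_matrix_spec : Claim_equal_solve_matrix := by
  intro matrix rhs _ hpre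
  unfold Spec_solve_matrix solve_matrix solve_matrix_alt
  exact pv_main matrix rhs hpre matrix.length le_rfl rhs
    (List.replicate matrix.length false) rfl (by simp)
    (fun k hk => by simp [pvX])
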